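-- pv_equiv track=rewrite | github.com/con2000us/zenTable | debug/calibrate_analyze.py | match_pattern_sliding
-- ===== SOURCE A (Python) =====
-- from typing import Optional, Dict, Any, List, Tuple
--
-- def match_pattern_sliding(quantized: List[int], pattern: List[int]) -> int:
--     """滑動視窗比對 pattern（量化值完全匹配），回傳匹配起始索引，否則回傳 -1"""
--     if len(quantized) < len(pattern):
--         return -1
--     for start in range(len(quantized) - len(pattern) + 1):
--         match = True
--         for i, (a, b) in enumerate(zip(quantized[start:start + len(pattern)], pattern)):
--             if a != b:
--                 match = False
--                 break
--         if match:
--             return start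
--     return -1
-- ===== SOURCE B (Python) =====
-- def match_pattern_sliding(quantized, pattern):
--     """Rabin-Karp: rolling polynomial hash filters candidates; a slice is
--     compared only on a hash hit, so the result is exact."""
--     n, m = len(quantized), len(pattern)
--     if n < m:
--         return -1
--     B, M = 1000003, 2305843009213693951
--     hp = 0
--     for x in pattern:
--         hp = (hp * B + x) % M
--     h = 0
--     for x in quantized[:m]:
--         h = (h * B + x) % M
--     power = 1
--     for _ in range(m - 1):
--         power = power * B % M
--     for i in range(n - m + 1):
--         if h == hp and quantized[i:i + m] == pattern:
--             return i
--         if i + m < n: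
--             h = ((h - quantized[i] * power) * B + quantized[i + m]) % M
--     return -1
-- ===== Notes on version B (the rewrite author's own statement) =====
-- stated objective: alternative
-- what changed: Replaces the nested slide-and-compare scan with Rabin-Karp: a rolling polynomial hash is maintained over the window and the slice is compared against the pattern only on a hash hit.
import Mathlib
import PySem

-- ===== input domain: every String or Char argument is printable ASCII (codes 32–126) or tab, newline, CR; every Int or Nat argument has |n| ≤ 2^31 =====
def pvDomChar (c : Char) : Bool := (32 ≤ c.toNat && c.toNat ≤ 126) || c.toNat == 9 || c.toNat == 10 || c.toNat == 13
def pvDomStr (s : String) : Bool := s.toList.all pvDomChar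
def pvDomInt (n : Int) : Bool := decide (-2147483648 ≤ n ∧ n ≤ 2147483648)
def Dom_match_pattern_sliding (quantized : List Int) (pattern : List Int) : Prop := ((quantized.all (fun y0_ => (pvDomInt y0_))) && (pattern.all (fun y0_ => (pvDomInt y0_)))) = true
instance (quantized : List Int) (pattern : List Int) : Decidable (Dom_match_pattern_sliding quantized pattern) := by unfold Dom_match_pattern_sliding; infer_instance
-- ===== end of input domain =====

-- B replaces A's nested slide-and-compare scan by Rabin-Karp (rolling hash, slice
-- compared only on a hash hit); same return value on every input (objective: alternative).

-- ===== PORT A =====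
-- inner 'for i, (a, b) in enumerate(zip(...))' loop with the match flag and break
def pvAInner : List (Int × Int) → Bool
  | [] => true
  | (a, b) :: rest => if a ≠ b then false else pvAInner rest

-- outer 'for start in range(...)' loop with early return
def pvALoop (quantized pattern : List Int) (m : Int) : List Int → Int
  | [] => -1
  | s :: rest =>
    if pvAInner ((PySem.List.slice quantized (some s) (some (s + m))).zip pattern) then s
    else pvALoop quantized pattern m rest

def match_pattern_sliding (quantized : List Int) (pattern : List Int) : Int :=
  if PySem.List.len quantized < PySem.List.len pattern then -1
  else pvALoop quantized pattern (PySem.List.len pattern)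
    (PySem.List.pyRange 0 (PySem.List.len quantized - PySem.List.len pattern + 1) 1)

-- ===== PORT B =====
def pvRkB : Int := 1000003
def pvRkM : Int := 2305843009213693951

-- 'h = (h * B + x) % M' folded over a list (pattern hash / initial window hash)
def pvHash (xs : List Int) : Int :=
  xs.foldl (fun h x => PySem.Int.mod (h * pvRkB + x) pvRkM) 0

-- 'for i in range(n - m + 1)' loop carrying the rolling hash h; quantized[i] and
-- quantized[i + m] are read only at indices the loop keeps in range, so pyGetD _ _ 0 is exact there
def pvBLoop (quantized pattern : List Int) (hp power n m : Int) : List Int → Int → Int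
  | [], _ => -1
  | i :: rest, h =>
    if h = hp ∧ PySem.List.slice quantized (some i) (some (i + m)) = pattern then i
    else pvBLoop quantized pattern hp power n m rest
      (if i + m < n then
        PySem.Int.mod ((h - (PySem.List.pyGetD quantized i 0) * power) * pvRkB
            + PySem.List.pyGetD quantized (i + m) 0) pvRkM
       else h)

def match_pattern_sliding_alt (quantized : List Int) (pattern : List Int) : Int :=
  let n := PySem.List.len quantized
  let m := PySem.List.len pattern
  if n < m then -1
  else
    let hp := pvHash pattern
    let h0 := pvHash (PySem.List.slice quantized none (some m))
    let power := (PySem.List.pyRange 0 (m - 1) 1).foldl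
      (fun p _ => PySem.Int.mod (p * pvRkB) pvRkM) 1
    pvBLoop quantized pattern hp power n m (PySem.List.pyRange 0 (n - m + 1) 1) h0

-- ===== PRECONDITION & SPEC =====
def Spec_match_pattern_sliding (quantized : List Int) (pattern : List Int) (out : Int) : Prop := out = match_pattern_sliding_alt quantized pattern
instance (quantized : List Int) (pattern : List Int) (out : Int) : Decidable (Spec_match_pattern_sliding quantized pattern out) := by unfold Spec_match_pattern_sliding; infer_instance

-- ===== CLAIM (what is proved, stated in full; the proofs are below) =====
def Claim_equal_match_pattern_sliding : Prop := ∀ (quantized : List Int) (pattern : List Int), Dom_match_pattern_sliding quantized pattern → Spec_match_pattern_sliding quantized pattern (match_pattern_sliding quantized pattern)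

-- ===== LEMMAS AND PROOFS =====

-- raw (un-modded) polynomial hash
def pvRaw (xs : List Int) : Int := xs.foldl (fun h x => h * pvRkB + x) 0

theorem pvRkM_pos : (0 : Int) < pvRkM := by norm_num [pvRkM]

theorem pvRaw_acc (l : List Int) : ∀ a : Int,
    l.foldl (fun h x => h * pvRkB + x) a = a * pvRkB ^ l.length + pvRaw l := by
  induction l with
  | nil => intro a; simp [pvRaw]
  | cons x l ih =>
    intro a
    simp only [List.foldl_cons, List.length_cons, pvRaw]
    rw [ih, ih]
    ring

theorem pvHash_res (l : List Int) : ∀ a a' : Int, a % pvRkM = a' % pvRkM →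
    (l.foldl (fun h x => PySem.Int.mod (h * pvRkB + x) pvRkM) a) % pvRkM
      = (l.foldl (fun h x => h * pvRkB + x) a') % pvRkM := by
  induction l with
  | nil => intro a a' h; simpa using h
  | cons x l ih =>
    intro a a' h
    simp only [List.foldl_cons]
    apply ih
    rw [PySem.Int.mod_eq_emod_of_pos pvRkM_pos, Int.emod_emod_of_dvd _ dvd_rfl]
    exact (Int.ModEq.add_right x (Int.ModEq.mul_right pvRkB h))

theorem pvPow_res (l : List Int) : ∀ a a' : Int, a % pvRkM = a' % pvRkM →
    (l.foldl (fun p _ => PySem.Int.mod (p * pvRkB) pvRkM) a) % pvRkM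
      = (a' * pvRkB ^ l.length) % pvRkM := by
  induction l with
  | nil => intro a a' h; simpa using h
  | cons x l ih =>
    intro a a' h
    simp only [List.foldl_cons, List.length_cons]
    rw [ih (PySem.Int.mod (a * pvRkB) pvRkM) (a' * pvRkB)
      (by rw [PySem.Int.mod_eq_emod_of_pos pvRkM_pos, Int.emod_emod_of_dvd _ dvd_rfl]
          exact Int.ModEq.mul_right pvRkB h)]
    ring_nf

-- rolling-hash step: removing the leading element and appending y gives the next window's hash
theorem pvRoll (x y : Int) (t : List Int) (power : Int)
    (hpw : power % pvRkM = (pvRkB ^ t.length) % pvRkM) :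
    PySem.Int.mod ((pvHash (x :: t) - x * power) * pvRkB + y) pvRkM = pvHash (t ++ [y]) := by
  have hta : pvHash (t ++ [y]) = PySem.Int.mod (pvHash t * pvRkB + y) pvRkM := by
    simp [pvHash, List.foldl_append]
  rw [hta, PySem.Int.mod_eq_emod_of_pos pvRkM_pos, PySem.Int.mod_eq_emod_of_pos pvRkM_pos]
  have hxt : pvHash (x :: t) % pvRkM = (x * pvRkB ^ t.length + pvRaw t) % pvRkM := by
    have := pvHash_res (x :: t) 0 0 rfl
    simpa [pvHash, pvRaw, pvRaw_acc t x] using this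
  have ht : pvHash t % pvRkM = pvRaw t % pvRkM := pvHash_res t 0 0 rfl
  have h1 : pvHash (x :: t) - x * power ≡ pvRaw t [ZMOD pvRkM] := by
    have e1 : pvHash (x :: t) ≡ x * pvRkB ^ t.length + pvRaw t [ZMOD pvRkM] := hxt
    have e2 : x * power ≡ x * pvRkB ^ t.length [ZMOD pvRkM] := Int.ModEq.mul_left x hpw
    simpa using e1.sub e2
  have h2 : pvRaw t ≡ pvHash t [ZMOD pvRkM] := ht.symm
  exact ((h1.trans h2).mul_right pvRkB).add_right y

-- the inner flag-and-break loop accepts exactly when the window equals the pattern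
theorem pvAInner_iff (w p : List Int) (hl : w.length = p.length) :
    pvAInner (w.zip p) = true ↔ w = p := by
  induction w generalizing p with
  | nil => cases p <;> simp [pvAInner] at hl ⊢
  | cons a w ih =>
    cases p with
    | nil => simp at hl
    | cons b p =>
      simp only [List.zip_cons_cons, pvAInner]
      by_cases hab : a = b
      · simp [hab, ih p (by simpa using hl)]
      · simp [hab]

theorem pvLoop_eq (q p : List Int) (pw : Int)
    (hpw : pw % pvRkM = (pvRkB ^ (p.length - 1)) % pvRkM) (hmn : p.length ≤ q.length) :
    ∀ (k j : Nat) (h : Int), j + k = q.length - p.length + 1 →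
    h = pvHash ((q.drop j).take p.length) →
    pvBLoop q p (pvHash p) pw (q.length : Int) (p.length : Int)
        (PySem.List.pyRange (j : Int) ((q.length : Int) - (p.length : Int) + 1) 1) h
      = pvALoop q p (p.length : Int)
        (PySem.List.pyRange (j : Int) ((q.length : Int) - (p.length : Int) + 1) 1) := by
  intro k
  induction k with
  | zero =>
    intro j h hjk hh
    rw [PySem.List.pyRange_one_eq_nil (by omega)]
    rfl
  | succ k ih =>
    intro j h hjk hh
    have hjlt : (j : Int) < (q.length : Int) - (p.length : Int) + 1 := by omega
    rw [PySem.List.pyRange_one_cons hjlt]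
    have hwlen : ((q.drop j).take p.length).length = p.length := by simp; omega
    have hslice : PySem.List.slice q (some (j:Int)) (some ((j:Int) + (p.length:Int))) =
        (q.drop j).take p.length := PySem.List.slice_natCast_add q j p.length
    have hAiff := pvAInner_iff ((q.drop j).take p.length) p hwlen
    simp only [pvBLoop, pvALoop, hslice]
    by_cases hwp : (q.drop j).take p.length = p
    · rw [if_pos (hAiff.2 hwp), if_pos ⟨by rw [hh, hwp], hwp⟩]
    · rw [if_neg (fun hc => hwp (And.right hc)), if_neg (fun hc => hwp (hAiff.1 hc))]
      by_cases hcont : (j:Int) + (p.length:Int) < (q.length:Int)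
      · have hm1 : 1 ≤ p.length := by
          by_contra h0
          refine hwp ?_
          have hl0 : p.length = 0 := by omega
          have hp0 : p = [] := List.length_eq_zero_iff.mp hl0
          simp [hp0]
        obtain ⟨m', hm'⟩ : ∃ m', p.length = m' + 1 := ⟨p.length - 1, by omega⟩
        have hjpn : j + p.length < q.length := by omega
        have hjn : j < q.length := by omega
        have hm'lt : m' < (q.drop (j+1)).length := by simp; omega
        have hg1 : PySem.List.pyGetD q (j:Int) 0 = q.getD j 0 :=
          PySem.List.pyGetD_natCast q j 0
        have hg2 : PySem.List.pyGetD q ((j:Int) + (p.length:Int)) 0 = q.getD (j + p.length) 0 := by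
          rw [show (j:Int) + (p.length:Int) = ((j + p.length : Nat) : Int) from by push_cast; ring]
          exact PySem.List.pyGetD_natCast q (j + p.length) 0
        have hdrop : q.drop j = q.getD j 0 :: q.drop (j+1) := by
          rw [List.drop_eq_getElem_cons hjn, List.getD_eq_getElem q 0 hjn]
        have hwcons : (q.drop j).take p.length = q.getD j 0 :: (q.drop (j+1)).take m' := by
          rw [hdrop, hm', List.take_succ_cons]
        have hgd : (q.drop (j+1)).getD m' 0 = q.getD (j + p.length) 0 := by
          rw [List.getD_eq_getElem?_getD, List.getElem?_drop,
            show j + 1 + m' = j + p.length from by omega, ← List.getD_eq_getElem?_getD]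
        have hwin1 : (q.drop (j+1)).take p.length =
            (q.drop (j+1)).take m' ++ [q.getD (j + p.length) 0] := by
          rw [hm', List.take_add_one, List.getElem?_eq_getElem hm'lt, ← List.getD_eq_getElem _ 0 hm'lt, hgd]
          simp [← hm']
        have htlen : ((q.drop (j+1)).take m').length = m' := by simp; omega
        have hnew : PySem.Int.mod ((h - PySem.List.pyGetD q (j:Int) 0 * pw) * pvRkB
              + PySem.List.pyGetD q ((j:Int) + (p.length:Int)) 0) pvRkM
            = pvHash ((q.drop (j+1)).take p.length) := by
          rw [hg1, hg2, hh, hwcons, hwin1]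
          exact pvRoll (q.getD j 0) (q.getD (j + p.length) 0) ((q.drop (j+1)).take m') pw
            (by rw [htlen, show m' = p.length - 1 from by omega]; exact hpw)
        rw [if_pos hcont, hnew]
        have := ih (j+1) _ (by omega) rfl
        rw [Nat.cast_add, Nat.cast_one] at this
        exact this
      · rw [if_neg hcont, PySem.List.pyRange_one_eq_nil (by omega)]
        rfl

-- ===== VERDICT (by name: the statement is the Claim_ definition above) =====
theorem match_pattern_sliding_spec : Claim_equal_match_pattern_sliding := by
  unfold Claim_equal_match_pattern_sliding Spec_match_pattern_sliding
  intro q p _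
  unfold match_pattern_sliding match_pattern_sliding_alt
  simp only [PySem.List.len_eq]
  by_cases hlt : (q.length : Int) < (p.length : Int)
  · simp [hlt]
  · simp only [if_neg hlt]
    have hmn : p.length ≤ q.length := by exact_mod_cast not_lt.mp hlt
    have hpw := pvPow_res (PySem.List.pyRange 0 ((p.length:Int) - 1) 1) 1 1 rfl
    have hlen : (PySem.List.pyRange 0 ((p.length:Int) - 1) 1).length = p.length - 1 := by
      rw [PySem.List.length_pyRange_one]; omega
    rw [hlen, one_mul] at hpw
    have h0 : pvHash (PySem.List.slice q none (some (p.length:Int))) =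
        pvHash ((q.drop 0).take p.length) := by
      rw [PySem.List.slice_to_natCast]; simp
    have := (pvLoop_eq q p _ hpw hmn (q.length - p.length + 1) 0 _ (by omega) h0).symm
    simpa using this
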